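-- pv_equiv track=rewrite | github.com/Ethan-Yang0101/Resume-BERT-NER-Project | project_label_studio/project_selector.py | filter_pattern_wrong_data
-- ===== SOURCE A (Python) =====
-- def filter_pattern_wrong_data(tags_list):
--     '''
--     筛选出所有具有明显模式错误的数据
--     有时间的行，上中下行有经历
--     有经历的行，上中下行有时间
--     '''
--     is_pattern_wrong_data = False
--     time_label = ['B-timeRange', 'I-timeRange']
--     name_label = ['B-projectName', 'I-projectName']
--     all_spec_label = time_label + name_label
--     for index, tags in enumerate(tags_list):
--         if index != 0 and index != len(tags_list) - 1:
--             if 'B-projectName' in tags or 'I-projectName' in tags: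
--                 in_front = any(
--                     [tag in time_label for tag in tags_list[index-1]])
--                 in_mid = any([tag in time_label for tag in tags_list[index]])
--                 in_back = any(
--                     [tag in time_label for tag in tags_list[index+1]])
--                 if not in_front and not in_mid and not in_back:
--                     is_pattern_wrong_data = True
--                     break
--             if 'B-timeRange' in tags or 'I-timeRange' in tags:
--                 in_front = any(
--                     [tag in name_label for tag in tags_list[index-1]])
--                 in_mid = any([tag in name_label for tag in tags_list[index]])
--                 in_back = any(
--                     [tag in name_label for tag in tags_list[index+1]])
--                 if not in_front and not in_mid and not in_back:
--                     is_pattern_wrong_data = True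
--                     break
--     return is_pattern_wrong_data
-- ===== SOURCE B (Python) =====
-- def filter_pattern_wrong_data(tags_list):
--     '''Two-pass version: precompute per-row label tables, then scan windows.'''
--     time_label = {'B-timeRange', 'I-timeRange'}
--     name_label = {'B-projectName', 'I-projectName'}
--     has_time = [any(t in time_label for t in tags) for tags in tags_list]
--     has_name = [any(t in name_label for t in tags) for tags in tags_list]
--     for i in range(1, len(tags_list) - 1):
--         if has_name[i] and not (has_time[i-1] or has_time[i] or has_time[i+1]):
--             return True
--         if has_time[i] and not (has_name[i-1] or has_name[i] or has_name[i+1]):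
--             return True
--     return False
-- ===== Notes on version B (the rewrite author's own statement) =====
-- stated objective: simpler
-- what changed: B first precomputes two boolean tables (has_time/has_name per row) in one pass, then does a plain window scan over interior indices with O(1) lookups, instead of A's single loop that rebuilds the label-membership scans of three neighbouring rows at every index.
import Mathlib
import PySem

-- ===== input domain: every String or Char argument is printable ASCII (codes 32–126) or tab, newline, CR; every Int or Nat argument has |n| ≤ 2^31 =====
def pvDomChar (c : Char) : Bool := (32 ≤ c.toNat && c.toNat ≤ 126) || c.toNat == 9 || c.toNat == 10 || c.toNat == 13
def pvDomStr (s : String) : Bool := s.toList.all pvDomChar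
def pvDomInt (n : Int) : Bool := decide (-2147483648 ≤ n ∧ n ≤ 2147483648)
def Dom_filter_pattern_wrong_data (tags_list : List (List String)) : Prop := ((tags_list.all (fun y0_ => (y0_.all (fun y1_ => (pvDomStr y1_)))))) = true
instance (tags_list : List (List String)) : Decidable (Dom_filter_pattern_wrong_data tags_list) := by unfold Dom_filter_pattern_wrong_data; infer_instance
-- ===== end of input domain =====

-- B replaces A's per-index rescans of neighbour rows by two precomputed boolean tables
-- followed by a plain window scan (objective: simpler decomposition; same asymptotic cost).


-- ===== PORT A =====
def pvTimeLabel : List String := ["B-timeRange", "I-timeRange"]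
def pvNameLabel : List String := ["B-projectName", "I-projectName"]

-- any([tag in label for tag in row])
def pvAnyIn (label row : List String) : Bool := row.any (fun tag => label.contains tag)

-- A's loop over enumerate(tags_list), with `break` as an early `true` return.
-- tags_list[index±1]/[index] ported via pyGetD (indices provably in range, so exact).
def pvALoop (tags_list : List (List String)) : List (Int × List String) → Bool
  | [] => false
  | (index, tags) :: rest =>
    if index ≠ 0 ∧ index ≠ (tags_list.length : Int) - 1 then
      if tags.contains "B-projectName" || tags.contains "I-projectName" then
        let in_front := pvAnyIn pvTimeLabel (PySem.List.pyGetD tags_list (index - 1) [])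
        let in_mid := pvAnyIn pvTimeLabel (PySem.List.pyGetD tags_list index [])
        let in_back := pvAnyIn pvTimeLabel (PySem.List.pyGetD tags_list (index + 1) [])
        if !in_front && !in_mid && !in_back then true
        else if tags.contains "B-timeRange" || tags.contains "I-timeRange" then
          let in_front := pvAnyIn pvNameLabel (PySem.List.pyGetD tags_list (index - 1) [])
          let in_mid := pvAnyIn pvNameLabel (PySem.List.pyGetD tags_list index [])
          let in_back := pvAnyIn pvNameLabel (PySem.List.pyGetD tags_list (index + 1) [])
          if !in_front && !in_mid && !in_back then true
          else pvALoop tags_list rest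
        else pvALoop tags_list rest
      else if tags.contains "B-timeRange" || tags.contains "I-timeRange" then
        let in_front := pvAnyIn pvNameLabel (PySem.List.pyGetD tags_list (index - 1) [])
        let in_mid := pvAnyIn pvNameLabel (PySem.List.pyGetD tags_list index [])
        let in_back := pvAnyIn pvNameLabel (PySem.List.pyGetD tags_list (index + 1) [])
        if !in_front && !in_mid && !in_back then true
        else pvALoop tags_list rest
      else pvALoop tags_list rest
    else pvALoop tags_list rest

def filter_pattern_wrong_data (tags_list : List (List String)) : Bool :=
  pvALoop tags_list (PySem.List.enumerate tags_list 0)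

-- ===== PORT B =====
-- B's window scan over has_time/has_name tables, with early `return True`.
def pvBLoop (hasTime hasName : List Bool) : List Nat → Bool
  | [] => false
  | i :: rest =>
    if hasName.getD i false
        && !(hasTime.getD (i-1) false || hasTime.getD i false || hasTime.getD (i+1) false) then
      true
    else if hasTime.getD i false
        && !(hasName.getD (i-1) false || hasName.getD i false || hasName.getD (i+1) false) then
      true
    else pvBLoop hasTime hasName rest

def filter_pattern_wrong_data_alt (tags_list : List (List String)) : Bool :=
  let hasTime := tags_list.map (fun tags => tags.any (fun t => pvTimeLabel.contains t))
  let hasName := tags_list.map (fun tags => tags.any (fun t => pvNameLabel.contains t))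
  -- range(1, len(tags_list) - 1)
  pvBLoop hasTime hasName (List.range' 1 (tags_list.length - 2))

-- ===== PRECONDITION & SPEC =====
def Spec_filter_pattern_wrong_data (tags_list : List (List String)) (out : Bool) : Prop := out = filter_pattern_wrong_data_alt tags_list
instance (tags_list : List (List String)) (out : Bool) : Decidable (Spec_filter_pattern_wrong_data tags_list out) := by unfold Spec_filter_pattern_wrong_data; infer_instance

-- ===== CLAIM (what is proved, stated in full; the proofs are below) =====
def Claim_equal_filter_pattern_wrong_data : Prop := ∀ (tags_list : List (List String)), Dom_filter_pattern_wrong_data tags_list → Spec_filter_pattern_wrong_data tags_list (filter_pattern_wrong_data tags_list)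

-- ===== LEMMAS AND PROOFS =====

-- the condition A's loop tests at one enumerate entry
def pvAcond (tags_list : List (List String)) (p : Int × List String) : Bool :=
  if p.1 ≠ 0 ∧ p.1 ≠ (tags_list.length : Int) - 1 then
    ((p.2.contains "B-projectName" || p.2.contains "I-projectName")
      && !(pvAnyIn pvTimeLabel (PySem.List.pyGetD tags_list (p.1 - 1) [])
           || pvAnyIn pvTimeLabel (PySem.List.pyGetD tags_list p.1 [])
           || pvAnyIn pvTimeLabel (PySem.List.pyGetD tags_list (p.1 + 1) [])))
    || ((p.2.contains "B-timeRange" || p.2.contains "I-timeRange")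
      && !(pvAnyIn pvNameLabel (PySem.List.pyGetD tags_list (p.1 - 1) [])
           || pvAnyIn pvNameLabel (PySem.List.pyGetD tags_list p.1 [])
           || pvAnyIn pvNameLabel (PySem.List.pyGetD tags_list (p.1 + 1) [])))
  else false

-- the condition B's loop tests at one index
def pvBcond (hasTime hasName : List Bool) (i : Nat) : Bool :=
  (hasName.getD i false
    && !(hasTime.getD (i-1) false || hasTime.getD i false || hasTime.getD (i+1) false))
  || (hasTime.getD i false
    && !(hasName.getD (i-1) false || hasName.getD i false || hasName.getD (i+1) false))

theorem pvALoop_eq_any (L : List (List String)) (l : List (Int × List String)) :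
    pvALoop L l = l.any (pvAcond L) := by
  induction l with
  | nil => rfl
  | cons p rest ih =>
    obtain ⟨i, tags⟩ := p
    simp only [pvALoop, pvAcond, List.any_cons]
    split_ifs <;> simp_all

theorem pvBLoop_eq_any (ht hn : List Bool) (l : List Nat) :
    pvBLoop ht hn l = l.any (pvBcond ht hn) := by
  induction l with
  | nil => rfl
  | cons i rest ih =>
    simp only [pvBLoop, pvBcond, List.any_cons]
    split_ifs <;> simp_all

theorem pvGetD_map_any (L : List (List String)) (lab : List String) (j : Nat) :
    (L.map (fun tags => tags.any (fun t => lab.contains t))).getD j false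
      = pvAnyIn lab (L.getD j []) := by
  simp only [List.getD, List.getElem?_map]
  cases L[j]? <;> simp [pvAnyIn]

theorem pvAnyIn_name (tags : List String) :
    pvAnyIn pvNameLabel tags
      = (tags.contains "B-projectName" || tags.contains "I-projectName") := by
  rw [Bool.eq_iff_iff]
  simp only [pvAnyIn, List.any_eq_true, List.contains_eq_mem, Bool.or_eq_true,
    decide_eq_true_eq]
  constructor
  · rintro ⟨t, ht, hm⟩
    simp only [pvNameLabel, List.mem_cons, List.not_mem_nil, or_false] at hm
    rcases hm with rfl | rfl <;> [left; right] <;> exact ht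
  · rintro (h | h) <;> exact ⟨_, h, by simp [pvNameLabel]⟩

theorem pvAnyIn_time (tags : List String) :
    pvAnyIn pvTimeLabel tags
      = (tags.contains "B-timeRange" || tags.contains "I-timeRange") := by
  rw [Bool.eq_iff_iff]
  simp only [pvAnyIn, List.any_eq_true, List.contains_eq_mem, Bool.or_eq_true,
    decide_eq_true_eq]
  constructor
  · rintro ⟨t, ht, hm⟩
    simp only [pvTimeLabel, List.mem_cons, List.not_mem_nil, or_false] at hm
    rcases hm with rfl | rfl <;> [left; right] <;> exact ht
  · rintro (h | h) <;> exact ⟨_, h, by simp [pvTimeLabel]⟩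

-- the two loop conditions agree at every interior index
theorem pvCond_eq (L : List (List String)) (k : Nat) (hk1 : 1 ≤ k) (hk2 : k + 1 < L.length) :
    pvAcond L ((k : Int), L[k]'(by omega)) =
      pvBcond (L.map (fun tags => tags.any (fun t => pvTimeLabel.contains t)))
              (L.map (fun tags => tags.any (fun t => pvNameLabel.contains t))) k := by
  have hk : k < L.length := by omega
  have hgd : L.getD k [] = L[k]'hk := by simp [List.getD, hk]
  have hb : (k : Int) ≠ 0 ∧ (k : Int) ≠ (L.length : Int) - 1 := by
    constructor <;> intro h <;> omega
  have e1 : ((k : Int) - 1) = ((k - 1 : Nat) : Int) := by omega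
  have e2 : ((k : Int) + 1) = ((k + 1 : Nat) : Int) := by omega
  simp only [pvAcond, if_pos hb, e1, e2, PySem.List.pyGetD_natCast, pvBcond,
    pvGetD_map_any, pvAnyIn_name, pvAnyIn_time, hgd]

-- ===== VERDICT (by name: the statement is the Claim_ definition above) =====
theorem filter_pattern_wrong_data_spec : Claim_equal_filter_pattern_wrong_data := by
  intro L _
  unfold Spec_filter_pattern_wrong_data filter_pattern_wrong_data filter_pattern_wrong_data_alt
  rw [pvALoop_eq_any, pvBLoop_eq_any, Bool.eq_iff_iff]
  simp only [List.any_eq_true, PySem.List.mem_enumerate_iff, List.mem_range']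
  constructor
  · rintro ⟨p, ⟨k, hk, rfl⟩, hc⟩
    simp only [zero_add] at hc
    have hbnds : 1 ≤ k ∧ k + 1 < L.length := by
      by_contra hcon
      have : (k : Int) = 0 ∨ (k : Int) = (L.length : Int) - 1 := by omega
      rw [pvAcond, if_neg (by tauto)] at hc
      exact absurd hc (by simp)
    rw [pvCond_eq L k hbnds.1 hbnds.2] at hc
    exact ⟨k, ⟨k - 1, by omega, by omega⟩, hc⟩
  · rintro ⟨k, ⟨j, hj, hkj⟩, hc⟩
    have hk1 : 1 ≤ k := by omega
    have hk2 : k + 1 < L.length := by omega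
    refine ⟨((k : Int), L[k]'(by omega)), ⟨k, by omega, by simp⟩, ?_⟩
    rw [pvCond_eq L k hk1 hk2]
    exact hc
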